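-- pv_equiv track=rewrite | github.com/cckssr/gyroscope-ui | src/device_manager.py | _is_line_corrupted
-- ===== SOURCE A (Python) =====
-- def _is_line_corrupted(line: str) -> bool:
--     """Check for obvious signs of line corruption."""
--     # Check for binary data or control characters
--     try:
--         line.encode("ascii")
--     except UnicodeEncodeError:
--         return True
--
--     # Check for too many consecutive identical characters (likely corruption)
--     for i in range(len(line) - 5):
--         if len(set(line[i : i + 6])) == 1:  # 6 identical chars in a row
--             return True
--
--     # Check for unreasonable line length
--     if len(line) > 500:  # Too long for normal CSV
--         return True
--
--     return False
-- ===== SOURCE B (Python) =====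
-- def _is_line_corrupted(line: str) -> bool:
--     """Check for obvious signs of line corruption."""
--     # Check for binary data or control characters
--     try:
--         line.encode("ascii")
--     except UnicodeEncodeError:
--         return True
--
--     # Check for 6 consecutive identical characters with a single run-length scan
--     prev = None
--     run = 0
--     for ch in line:
--         run = run + 1 if ch == prev else 1
--         prev = ch
--         if run >= 6:
--             return True
--
--     # Check for unreasonable line length
--     return len(line) > 500
-- ===== Notes on version B (the rewrite author's own statement) =====
-- stated objective: faster
-- what changed: The sliding-window loop that builds set(line[i:i+6]) at every index is replaced by a single run-length scan keeping only the previous character and the current run counter, returning as soon as a run reaches 6.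
import Mathlib
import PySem

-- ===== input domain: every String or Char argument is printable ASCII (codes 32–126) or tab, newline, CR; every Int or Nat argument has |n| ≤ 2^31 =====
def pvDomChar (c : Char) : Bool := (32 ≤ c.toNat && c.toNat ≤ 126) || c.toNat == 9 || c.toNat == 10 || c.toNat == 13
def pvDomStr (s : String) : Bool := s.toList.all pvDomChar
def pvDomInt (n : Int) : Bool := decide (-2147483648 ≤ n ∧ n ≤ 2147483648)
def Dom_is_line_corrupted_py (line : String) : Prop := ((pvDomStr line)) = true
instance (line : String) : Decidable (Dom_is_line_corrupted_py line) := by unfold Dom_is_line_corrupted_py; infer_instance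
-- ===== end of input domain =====

-- B replaces A's per-index construction of a 6-character window set by a single run-length scan
-- (previous character + current run counter); same three checks, same results.


-- ===== PORT A =====
def is_line_corrupted_py (line : String) : Bool :=
  let cs := line.toList
  -- try: line.encode("ascii") / except UnicodeEncodeError: return True
  if cs.any (fun c => 128 ≤ c.toNat) then true
  -- for i in range(len(line) - 5): if len(set(line[i:i+6])) == 1: return True
  else if (PySem.List.pyRange 0 ((cs.length : Int) - 5) 1).any
      (fun i => PySem.Set.len (PySem.Set.ofList (PySem.List.slice cs (some i) (some (i + 6)))) == 1) then true
  -- if len(line) > 500: return True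
  else if decide ((cs.length : Int) > 500) then true
  else false

-- ===== PORT B =====
-- run-length scan: previous character (none before the first) and current run length
def runScanB : List Char → Option Char → Nat → Bool
  | [], _, _ => false
  | c :: rest, prev, run =>
    let run' := if some c == prev then run + 1 else 1
    if 6 ≤ run' then true else runScanB rest (some c) run'

def is_line_corrupted_py_alt (line : String) : Bool :=
  let cs := line.toList
  if cs.any (fun c => 128 ≤ c.toNat) then true
  else if runScanB cs none 0 then true
  else decide ((cs.length : Int) > 500)

-- ===== PRECONDITION & SPEC =====
def Spec_is_line_corrupted_py (line : String) (out : Bool) : Prop := out = is_line_corrupted_py_alt line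
instance (line : String) (out : Bool) : Decidable (Spec_is_line_corrupted_py line out) := by unfold Spec_is_line_corrupted_py; infer_instance

-- ===== CLAIM (what is proved, stated in full; the proofs are below) =====
def Claim_equal_is_line_corrupted_py : Prop := ∀ (line : String), Dom_is_line_corrupted_py line → Spec_is_line_corrupted_py line (is_line_corrupted_py line)

-- ===== LEMMAS AND PROOFS =====

-- common intermediate: "some window of 6 consecutive equal characters exists", scanned head-first
def win6 : List Char → Bool
  | [] => false
  | x :: xs => (decide (xs.take 5 = List.replicate 5 x ∧ 5 ≤ xs.length)) || win6 xs

lemma win6_short (xs : List Char) (h : xs.length < 6) : win6 xs = false := by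
  induction xs with
  | nil => rfl
  | cons x xs ih =>
    simp only [win6, Bool.or_eq_false_iff]
    constructor
    · simp only [decide_eq_false_iff_not]
      rintro ⟨-, h5⟩
      simp at h; omega
    · exact ih (by simp at h ⊢; omega)

lemma ofList_replicate_succ (n : Nat) (x : Char) :
    PySem.Set.ofList (List.replicate (n + 1) x) = [x] := by
  induction n with
  | zero => rfl
  | succ k ih =>
    rw [show List.replicate (k + 1 + 1) x = List.replicate (k + 1) x ++ [x] from
      List.replicate_succ', PySem.Set.ofList_append_singleton, ih]
    exact PySem.Set.add_of_mem (by simp)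

-- a six-character window is a singleton set iff all its characters equal the first
lemma set_head6 (x a b c d e : Char) :
    (PySem.Set.len (PySem.Set.ofList [x, a, b, c, d, e]) == 1) =
      decide (a = x ∧ b = x ∧ c = x ∧ d = x ∧ e = x) := by
  rw [Bool.eq_iff_iff]
  simp only [beq_iff_eq, decide_eq_true_eq, PySem.Set.len]
  constructor
  · intro h
    have hlen : (PySem.Set.ofList [x, a, b, c, d, e]).length = 1 := by exact_mod_cast h
    obtain ⟨y, hy⟩ := List.length_eq_one_iff.mp hlen
    have hx : x ∈ PySem.Set.ofList [x, a, b, c, d, e] := (PySem.Set.mem_ofList _ _).mpr (by simp)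
    rw [hy] at hx
    simp at hx
    subst hx
    refine ⟨?_, ?_, ?_, ?_, ?_⟩ <;>
      [ (have hm := (PySem.Set.mem_ofList [x, a, b, c, d, e] a).mpr (by simp));
        (have hm := (PySem.Set.mem_ofList [x, a, b, c, d, e] b).mpr (by simp));
        (have hm := (PySem.Set.mem_ofList [x, a, b, c, d, e] c).mpr (by simp));
        (have hm := (PySem.Set.mem_ofList [x, a, b, c, d, e] d).mpr (by simp));
        (have hm := (PySem.Set.mem_ofList [x, a, b, c, d, e] e).mpr (by simp))] <;>
    · rw [hy] at hm; simpa using hm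
  · rintro ⟨ha, hb, hc, hd, he⟩
    simp only [ha, hb, hc, hd, he]
    rw [show ([x, x, x, x, x, x] : List Char) = List.replicate 6 x from rfl,
      ofList_replicate_succ]
    rfl

-- A's window scan equals the head-first window recursion
lemma aloop_eq_win6 (cs : List Char) :
    (List.range (cs.length - 5)).any
      (fun i => PySem.Set.len (PySem.Set.ofList ((cs.drop i).take 6)) == 1) = win6 cs := by
  induction cs with
  | nil => rfl
  | cons x xs ih =>
    by_cases h : 5 ≤ xs.length
    · have hlen : (x :: xs).length - 5 = (xs.length - 5) + 1 := by simp; omega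
      rw [hlen, List.range_succ_eq_map, List.any_cons, List.any_map]
      have htail : (List.range (xs.length - 5)).any
          ((fun i => PySem.Set.len (PySem.Set.ofList (((x :: xs).drop i).take 6)) == 1) ∘ Nat.succ)
          = win6 xs := by
        rw [← ih]
        apply PySem.List.any_congr_mem
        intro i hi
        simp [List.drop_succ_cons]
      rw [htail]
      rcases xs with _ | ⟨a, _ | ⟨b, _ | ⟨c, _ | ⟨d, _ | ⟨e, t⟩⟩⟩⟩⟩
      · exfalso; simp at h
      · exfalso; simp at h
      · exfalso; simp at h
      · exfalso; simp at h
      · exfalso; simp at h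
      · rw [show (((x :: a :: b :: c :: d :: e :: t).drop 0).take 6) = [x, a, b, c, d, e] from rfl,
          set_head6]
        show _ = (decide ((a :: b :: c :: d :: e :: t).take 5 = List.replicate 5 x ∧
          5 ≤ (a :: b :: c :: d :: e :: t).length) || win6 (a :: b :: c :: d :: e :: t))
        congr 1
        rw [show (a :: b :: c :: d :: e :: t).take 5 = [a, b, c, d, e] from rfl,
          show List.replicate 5 x = [x, x, x, x, x] from rfl, decide_eq_decide]
        simp
    · have h0 : (x :: xs).length - 5 = 0 := by simp; omega
      rw [h0]
      show false = _
      symm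
      exact win6_short _ (by simp; omega)

-- A's pyRange/slice loop in terms of List.range and drop/take
lemma aloop_bridge (cs : List Char) :
    (PySem.List.pyRange 0 ((cs.length : Int) - 5) 1).any
      (fun i => PySem.Set.len (PySem.Set.ofList (PySem.List.slice cs (some i) (some (i + 6)))) == 1) =
    (List.range (cs.length - 5)).any
      (fun i => PySem.Set.len (PySem.Set.ofList ((cs.drop i).take 6)) == 1) := by
  rw [PySem.List.pyRange_one, List.any_map]
  have hlen : (((cs.length : Int) - 5) - 0).toNat = cs.length - 5 := by omega
  rw [hlen]
  apply PySem.List.any_congr_mem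
  intro i hi
  simp only [Function.comp_apply, zero_add]
  rw [show ((i : Int) + 6) = ((i : Int) + ((6 : Nat) : Int)) from by norm_num,
    PySem.List.slice_natCast_add]

-- skipping a too-short run of p's (ended by c ≠ p) cannot hide a window
lemma win6_skip (p c : Char) (hc : c ≠ p) (k : Nat) (hk : k ≤ 5) (rest : List Char) :
    win6 (List.replicate k p ++ c :: rest) = win6 (c :: rest) := by
  induction k with
  | zero => simp
  | succ m ih =>
    rw [List.replicate_succ, List.cons_append]
    show (decide _ || _) = _
    rw [ih (by omega)]
    have hfalse : decide ((List.replicate m p ++ c :: rest).take 5 = List.replicate 5 p ∧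
        5 ≤ (List.replicate m p ++ c :: rest).length) = false := by
      simp only [decide_eq_false_iff_not]
      rintro ⟨ht, -⟩
      have h1 := congrArg (fun l => l[m]?) ht
      simp only [List.getElem?_take, List.getElem?_append_right, List.length_replicate,
        le_refl, Nat.sub_self] at h1
      have hm5 : m < 5 := by omega
      simp [hm5] at h1
      interval_cases m <;> exact hc (by simpa using h1)
    rw [hfalse]
    simp

-- run-length invariant: the counter stands for a replicate-prefix already read
lemma runScanB_eq (l : List Char) : ∀ (p : Char) (cnt : Nat), 1 ≤ cnt → cnt ≤ 5 →
    runScanB l (some p) cnt = win6 (List.replicate cnt p ++ l) := by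
  induction l with
  | nil =>
    intro p cnt h1 h5
    show false = _
    rw [List.append_nil, win6_short _ (by simp; omega)]
  | cons c rest ih =>
    intro p cnt h1 h5
    by_cases hc : c = p
    · subst hc
      by_cases hfull : cnt = 5
      · subst hfull
        have hrun : runScanB (c :: rest) (some c) 5 = true := by simp [runScanB]
        have hlist : List.replicate 5 c ++ c :: rest = c :: (List.replicate 5 c ++ rest) := by
          simp [List.replicate_succ]
        rw [hrun, hlist]
        show _ = (decide ((List.replicate 5 c ++ rest).take 5 = List.replicate 5 c ∧
          5 ≤ (List.replicate 5 c ++ rest).length) || _)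
        simp
      · have hstep : runScanB (c :: rest) (some c) cnt = runScanB rest (some c) (cnt + 1) := by
          simp [runScanB]
          omega
        rw [hstep, ih c (cnt + 1) (by omega) (by omega)]
        congr 1
        rw [List.replicate_succ', List.append_assoc, List.singleton_append]
    · have hstep : runScanB (c :: rest) (some p) cnt = runScanB rest (some c) 1 := by
        simp [runScanB, hc]
      rw [hstep, ih c 1 le_rfl (by omega)]
      rw [win6_skip p c hc cnt h5 rest]
      congr 1

lemma runScanB_start (cs : List Char) : runScanB cs none 0 = win6 cs := by
  cases cs with
  | nil => rfl
  | cons c rest =>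
    have h1 : runScanB (c :: rest) none 0 = runScanB rest (some c) 1 := by
      simp [runScanB]
    rw [h1, runScanB_eq rest c 1 le_rfl (by omega)]
    congr 1

lemma dom_ascii (line : String) (h : pvDomStr line = true) :
    line.toList.any (fun c => 128 ≤ c.toNat) = false := by
  simp only [pvDomStr, List.all_eq_true] at h
  simp only [List.any_eq_false]
  intro c hc
  have := h c hc
  simp [pvDomChar] at this ⊢
  omega

-- ===== VERDICT (by name: the statement is the Claim_ definition above) =====
theorem is_line_corrupted_py_spec : Claim_equal_is_line_corrupted_py := by
  intro line hdom
  unfold Spec_is_line_corrupted_py is_line_corrupted_py is_line_corrupted_py_alt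
  have hascii := dom_ascii line hdom
  simp only [hascii, Bool.false_eq_true, if_false]
  rw [aloop_bridge, aloop_eq_win6, ← runScanB_start]
  cases runScanB line.toList none 0 <;> simp
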